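-- pv_equiv track=rewrite | github.com/FedericoTudini/Homework-Python | 04/program01.py | vittorie
-- ===== SOURCE A (Python) =====
-- def check(s):
--     flag = False
--     for k in range(len(s)-1):
--         if s[k] > s[k+1]:
--             flag = True
--             break
--     return flag
--
-- def vittorie(e):
--     pari = 0
--     dispari = 0
--     for x in e:
--         if not check(x):
--             if len(x) % 2 == 0:
--                 pari += 1
--             else: dispari += 1
--     return pari, dispari
-- ===== SOURCE B (Python) =====
-- def vittorie(e):
--     pari = sum(1 for x in e if list(x) == sorted(x) and len(x) % 2 == 0)
--     dispari = sum(1 for x in e if list(x) == sorted(x) and len(x) % 2 == 1)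
--     return pari, dispari
-- ===== Notes on version B (the rewrite author's own statement) =====
-- stated objective: idiomatic
-- what changed: Replaced the index-based early-exit adjacent scan (helper check) and the mutable tally loop by two comprehension-style counts using the sortedness test list(x) == sorted(x).
import Mathlib
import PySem

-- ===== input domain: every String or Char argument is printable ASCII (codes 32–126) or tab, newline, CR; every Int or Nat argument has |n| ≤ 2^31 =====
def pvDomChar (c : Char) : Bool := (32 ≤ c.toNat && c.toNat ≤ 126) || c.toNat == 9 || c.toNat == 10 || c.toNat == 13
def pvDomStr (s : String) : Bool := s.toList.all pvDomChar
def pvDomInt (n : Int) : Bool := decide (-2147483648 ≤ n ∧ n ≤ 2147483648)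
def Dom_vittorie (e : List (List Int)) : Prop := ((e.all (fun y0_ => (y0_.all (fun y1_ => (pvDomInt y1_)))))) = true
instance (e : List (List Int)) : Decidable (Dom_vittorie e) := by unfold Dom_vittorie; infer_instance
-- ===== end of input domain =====

-- B replaces A's index-based early-exit adjacent scan and mutable tally loop by two
-- comprehension-style counts using the sortedness test list(x) == sorted(x) (idiomatic; not faster).

-- ===== PORT A =====
-- for k in range(len(s)-1): if s[k] > s[k+1]: flag = True; break   (break = stop recursing)
def checkLoop (s : List Int) : List Int → Bool
  | [] => false
  | k :: ks =>
    if (PySem.List.pyGet? s k).getD 0 > (PySem.List.pyGet? s (k + 1)).getD 0 then true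
    else checkLoop s ks

def check (s : List Int) : Bool :=
  checkLoop s (PySem.List.pyRange 0 ((s.length : Int) - 1) 1)

def vittorie (e : List (List Int)) : Int × Int :=
  e.foldl
    (fun (pd : Int × Int) x =>
      if !check x then
        if (x.length : Int) % 2 == 0 then (pd.1 + 1, pd.2) else (pd.1, pd.2 + 1)
      else pd)
    (0, 0)

-- ===== PORT B =====
def vittorie_alt (e : List (List Int)) : Int × Int :=
  ( (e.countP (fun x => x == PySem.List.sorted x (fun v => v) false && (x.length : Int) % 2 == 0) : Int),
    (e.countP (fun x => x == PySem.List.sorted x (fun v => v) false && (x.length : Int) % 2 == 1) : Int) )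

-- ===== PRECONDITION & SPEC =====
def Spec_vittorie (e : List (List Int)) (out : Int × Int) : Prop := out = vittorie_alt e
instance (e : List (List Int)) (out : Int × Int) : Decidable (Spec_vittorie e out) := by unfold Spec_vittorie; infer_instance

-- ===== CLAIM (what is proved, stated in full; the proofs are below) =====
def Claim_equal_vittorie : Prop := ∀ (e : List (List Int)), Dom_vittorie e → Spec_vittorie e (vittorie e)

-- ===== LEMMAS AND PROOFS =====

theorem checkLoop_false_iff (s : List Int) (ks : List Int) :
    checkLoop s ks = false ↔
      ∀ k ∈ ks, (PySem.List.pyGet? s k).getD 0 ≤ (PySem.List.pyGet? s (k + 1)).getD 0 := by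
  induction ks with
  | nil => simp [checkLoop]
  | cons k ks ih =>
    by_cases h : (PySem.List.pyGet? s k).getD 0 > (PySem.List.pyGet? s (k + 1)).getD 0
    · simp only [checkLoop, if_pos h]
      constructor
      · intro hc; exact absurd hc (by simp)
      · intro hall
        exact absurd (hall k (List.mem_cons_self)) (not_le.mpr h)
    · simp only [checkLoop, if_neg h]
      rw [ih]
      constructor
      · intro hall k' hk'
        rcases List.mem_cons.mp hk' with rfl | hk'
        · exact not_lt.mp h
        · exact hall k' hk'
      · intro hall k' hk'
        exact hall k' (List.mem_cons_of_mem _ hk')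

theorem check_false_iff_pairwise (s : List Int) :
    check s = false ↔ s.Pairwise (· ≤ ·) := by
  rw [check, checkLoop_false_iff, ← List.isChain_iff_pairwise, List.isChain_iff_getElem]
  constructor
  · intro h i hi
    have hmem : (i : Int) ∈ PySem.List.pyRange 0 ((s.length : Int) - 1) 1 := by
      rw [PySem.List.mem_pyRange_one]
      exact ⟨Int.natCast_nonneg i, by omega⟩
    have hle := h (i : Int) hmem
    have h1 : PySem.List.pyGet? s (i : Int) = some s[i] := by
      rw [PySem.List.pyGet?_natCast]
      exact List.getElem?_eq_getElem (by omega)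
    have h2 : PySem.List.pyGet? s ((i : Int) + 1) = some s[i + 1] := by
      have hc : ((i : Int) + 1) = ((i + 1 : Nat) : Int) := by push_cast; ring
      rw [hc, PySem.List.pyGet?_natCast]
      exact List.getElem?_eq_getElem hi
    rw [h1, h2] at hle
    simpa using hle
  · intro h k hk
    rw [PySem.List.mem_pyRange_one] at hk
    obtain ⟨hk0, hk1⟩ := hk
    obtain ⟨i, rfl⟩ := Int.eq_ofNat_of_zero_le hk0
    have hi : i + 1 < s.length := by omega
    have hle := h i hi
    have h1 : PySem.List.pyGet? s (i : Int) = some s[i] := by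
      rw [PySem.List.pyGet?_natCast]
      exact List.getElem?_eq_getElem (by omega)
    have h2 : PySem.List.pyGet? s ((i : Int) + 1) = some s[i + 1] := by
      have hc : ((i : Int) + 1) = ((i + 1 : Nat) : Int) := by push_cast; ring
      rw [hc, PySem.List.pyGet?_natCast]
      exact List.getElem?_eq_getElem hi
    rw [h1, h2]
    simpa using hle

theorem check_sorted_bridge (x : List Int) :
    (!check x) = (x == PySem.List.sorted x (fun v => v) false) := by
  by_cases h : check x = false
  · have hp : x.Pairwise (· ≤ ·) := (check_false_iff_pairwise x).mp h
    have hs : PySem.List.sorted x (fun v => v) false = x :=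
      PySem.List.sorted_eq_self_of_pairwise x (fun v => v) hp
    simp [h, hs]
  · have h' : check x = true := by revert h; cases check x <;> simp
    have hne : ¬ x = PySem.List.sorted x (fun v => v) false := by
      intro heq
      have hp := PySem.List.sorted_pairwise x (fun v => v)
      rw [← heq] at hp
      exact h ((check_false_iff_pairwise x).mpr hp)
    simp [h', hne]

theorem vittorie_foldl (e : List (List Int)) (p d : Int) :
    e.foldl
      (fun (pd : Int × Int) x =>
        if !check x then
          if (x.length : Int) % 2 == 0 then (pd.1 + 1, pd.2) else (pd.1, pd.2 + 1)
        else pd)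
      (p, d)
    = (p + (e.countP (fun x => !check x && (x.length : Int) % 2 == 0) : Int),
       d + (e.countP (fun x => !check x && (x.length : Int) % 2 == 1) : Int)) := by
  induction e generalizing p d with
  | nil => simp
  | cons x xs ih =>
    simp only [List.foldl_cons, List.countP_cons]
    by_cases hs : check x = false
    · have hm := Int.emod_two_eq (x.length : Int)
      rcases hm with hm | hm
      · have he : ((x.length : Int) % 2 == 0) = true := by simp [hm]
        have ho : ((x.length : Int) % 2 == 1) = false := by simp [hm]
        simp only [hs, he, ho, Bool.not_false, Bool.true_and, if_true]
        rw [ih]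
        simp only [Prod.mk.injEq]
        constructor <;> push_cast <;> ring
      · have he : ((x.length : Int) % 2 == 0) = false := by simp [hm]
        have ho : ((x.length : Int) % 2 == 1) = true := by simp [hm]
        simp only [hs, he, ho, Bool.not_false, Bool.true_and, if_true, Bool.false_eq_true,
          if_false]
        rw [ih]
        simp only [Prod.mk.injEq]
        constructor <;> push_cast <;> ring
    · have hs' : check x = true := by revert hs; cases check x <;> simp
      simp only [hs', Bool.not_true, Bool.false_and, Bool.false_eq_true, if_false]
      rw [ih]
      simp

theorem countP_bridge (q : List Int → Bool) (ys : List (List Int)) :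
    ys.countP (fun x => (x == PySem.List.sorted x (fun v => v) false) && q x)
      = ys.countP (fun x => !check x && q x) := by
  apply List.countP_congr
  intro x _
  rw [check_sorted_bridge]

-- ===== VERDICT (by name: the statement is the Claim_ definition above) =====
theorem vittorie_spec : Claim_equal_vittorie := by
  intro e _
  unfold Spec_vittorie vittorie vittorie_alt
  rw [vittorie_foldl e 0 0,
    countP_bridge (fun x => (x.length : Int) % 2 == 0) e,
    countP_bridge (fun x => (x.length : Int) % 2 == 1) e]
  simp
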